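-- pv_equiv track=rewrite | github.com/BIAOXYZ/variousCodes | _CodeTopics/LeetCode_contest/weekly/weekly2021/252/WA--252_2.py | numberOfWeeks
-- ===== SOURCE A (Python) =====
-- import heapq
--
-- def numberOfWeeks(milestones):
--     """
--     :type milestones: List[int]
--     :rtype: int
--     """
--
--     n = len(milestones)
--     m = [-milestones[i] for i in range(n)]
--     heapq.heapify(m)
--     for i in range(n-1):
--         largest = -heapq.heappop(m)
--         largest2 = -heapq.heappop(m)
--         heapq.heappush(m, -1 * (largest - largest2))
--     if m[0] in [-1, 0]:
--         return sum(milestones)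
--     else:
--         return sum(milestones) - (-m[0]) + 1
-- ===== SOURCE B (Python) =====
-- def numberOfWeeks(milestones):
--     """
--     :type milestones: List[int]
--     :rtype: int
--     """
--     vals = list(milestones)
--     for _ in range(len(vals) - 1):
--         a = max(vals)
--         vals.remove(a)
--         b = max(vals)
--         vals.remove(b)
--         vals.append(a - b)
--     f = vals[0]
--     if f == 0 or f == 1:
--         return sum(milestones)
--     else:
--         return sum(milestones) - f + 1
-- ===== Notes on version B (the rewrite author's own statement) =====
-- stated objective: simpler
-- what changed: replaces the negated heapq priority queue by a plain list scanned twice per round for its maximum (max then remove, on the positive values), and the final test on the negated heap root by the direct positive test that the residual equals zero or one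
import Mathlib
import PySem

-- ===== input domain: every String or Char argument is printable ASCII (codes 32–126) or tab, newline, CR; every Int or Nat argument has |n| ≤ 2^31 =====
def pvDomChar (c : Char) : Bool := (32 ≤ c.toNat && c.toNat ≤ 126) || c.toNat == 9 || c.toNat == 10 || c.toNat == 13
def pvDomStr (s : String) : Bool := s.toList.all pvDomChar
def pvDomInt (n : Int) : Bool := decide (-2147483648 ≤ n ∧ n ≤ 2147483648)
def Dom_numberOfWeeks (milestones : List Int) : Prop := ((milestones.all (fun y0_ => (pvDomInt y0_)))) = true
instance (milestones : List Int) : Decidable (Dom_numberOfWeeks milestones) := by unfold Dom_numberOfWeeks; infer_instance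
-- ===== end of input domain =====

-- B replaces A's negated heapq priority queue by a plain list scanned for its maximum twice per
-- round (max + remove on the positive values); same return value on every non-empty input.

-- ===== PORT A =====
-- helpers: literal transliteration of CPython's heapq (heapify / heappop / heappush,
-- _siftdown = bubble-up, _siftup = sift the hole to a leaf then bubble up); lists are indexed
-- with getD (every access is in range on the inputs admitted by Pre_).

def pvG (l : List Int) (i : Nat) : Int := l.getD i 0

-- heapq._siftdown(heap, startpos, pos), with newitem = heap[pos] passed explicitly
def pvSiftdown (a : List Int) (s p : Nat) (x : Int) : List Int :=
  if _h : s < p then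
    let pp := (p - 1) / 2
    let par := pvG a pp
    if x < par then pvSiftdown (a.set p par) s pp x
    else a.set p x
  else a.set p x
termination_by p
decreasing_by omega

-- the while-loop of heapq._siftup: sift the hole at pos down to a leaf, promoting smaller children
def pvSuLoop (a : List Int) (p : Nat) : List Int × Nat :=
  if _h : 2 * p + 1 < a.length then
    let c := if 2 * p + 2 < a.length ∧ ¬ (pvG a (2 * p + 1) < pvG a (2 * p + 2))
             then 2 * p + 2 else 2 * p + 1
    pvSuLoop (a.set p (pvG a c)) c
  else (a, p)
termination_by a.length - p
decreasing_by simp only [List.length_set]; split <;> omega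

-- heapq._siftup(heap, pos)
def pvSiftup (a : List Int) (p : Nat) : List Int :=
  pvSiftdown ((pvSuLoop a p).1.set (pvSuLoop a p).2 (pvG a p)) p (pvSuLoop a p).2 (pvG a p)

-- heapq.heapify(x): for i in reversed(range(n//2)): _siftup(x, i)
def pvHeapify (a : List Int) : List Int :=
  ((List.range (a.length / 2)).reverse).foldl (fun h i => pvSiftup h i) a

-- heapq.heappop(heap)
def pvHeappop (a : List Int) : Int × List Int :=
  let lastelt := pvG a (a.length - 1)
  let rest := a.dropLast
  if rest.isEmpty then (lastelt, rest)
  else (pvG rest 0, pvSiftup (rest.set 0 lastelt) 0)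

-- heapq.heappush(heap, item)
def pvHeappush (a : List Int) (item : Int) : List Int :=
  pvSiftdown (a ++ [item]) 0 a.length item

-- for i in range(n-1): largest = -heappop(m); largest2 = -heappop(m); heappush(m, -1*(largest-largest2))
def pvALoop : Nat → List Int → List Int
  | 0, m => m
  | k + 1, m =>
    let p1 := pvHeappop m
    let largest := -p1.1
    let p2 := pvHeappop p1.2
    let largest2 := -p2.1
    pvALoop k (pvHeappush p2.2 (-1 * (largest - largest2)))

def numberOfWeeks (milestones : List Int) : Int :=
  let n := milestones.length
  let m0 := milestones.map (fun x => -x)   -- [-milestones[i] for i in range(n)]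
  let m := pvALoop (n - 1) (pvHeapify m0)
  if pvG m 0 = -1 ∨ pvG m 0 = 0 then milestones.sum
  else milestones.sum - (-(pvG m 0)) + 1

-- ===== PORT B =====
-- for _ in range(len(vals)-1): a = max(vals); vals.remove(a); b = max(vals); vals.remove(b); vals.append(a-b)
def pvBLoop : Nat → List Int → List Int
  | 0, vals => vals
  | k + 1, vals =>
    let a := (PySem.List.max? vals (fun y => y)).getD 0
    let vals1 := (PySem.List.remove? vals a).getD vals
    let b := (PySem.List.max? vals1 (fun y => y)).getD 0
    let vals2 := (PySem.List.remove? vals1 b).getD vals1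
    pvBLoop k (vals2 ++ [a - b])

def numberOfWeeks_alt (milestones : List Int) : Int :=
  let vals := pvBLoop (milestones.length - 1) milestones
  let f := vals.getD 0 0
  if f = 0 ∨ f = 1 then milestones.sum
  else milestones.sum - f + 1

-- ===== PRECONDITION & SPEC =====
-- Pre_ excludes only the empty list, on which A raises IndexError at its final root access (B raises there too).
def Pre_numberOfWeeks (milestones : List Int) : Prop := milestones ≠ []
instance (milestones : List Int) : Decidable (Pre_numberOfWeeks milestones) := by
  unfold Pre_numberOfWeeks; infer_instance

def pvWitness_numberOfWeeks : List Int := [5, 2, 1]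

def Spec_numberOfWeeks (milestones : List Int) (out : Int) : Prop := out = numberOfWeeks_alt milestones
instance (milestones : List Int) (out : Int) : Decidable (Spec_numberOfWeeks milestones out) := by
  unfold Spec_numberOfWeeks; infer_instance

-- ===== CLAIM (what is proved, stated in full; the proofs are below) =====
def Claim_equal_numberOfWeeks : Prop := ∀ (milestones : List Int), Dom_numberOfWeeks milestones → Pre_numberOfWeeks milestones → Spec_numberOfWeeks milestones (numberOfWeeks milestones)

-- ===== LEMMAS AND PROOFS =====

-- heap order property from index s on: every parent u ≥ s is ≤ its in-range children
def pvHeapFrom (a : List Int) (s : Nat) : Prop :=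
  ∀ u v, s ≤ u → (v = 2 * u + 1 ∨ v = 2 * u + 2) → v < a.length → pvG a u ≤ pvG a v

-- p lies in the subtree rooted at s (iterating the parent map (p-1)/2 reaches s)
def pvDescB (s p : Nat) : Bool :=
  if p < s then false
  else if p = s then true
  else pvDescB s ((p - 1) / 2)
termination_by p
decreasing_by omega

theorem pvG_set_eq {l : List Int} {i : Nat} (h : i < l.length) (x : Int) :
    pvG (l.set i x) i = x := by
  simp [pvG, List.getD, h]

theorem pvG_set_ne {l : List Int} {i j : Nat} (h : i ≠ j) (x : Int) :
    pvG (l.set i x) j = pvG l j := by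
  simp [pvG, List.getD, List.getElem?_set_ne h]

theorem pvG_mem {l : List Int} {i : Nat} (h : i < l.length) : pvG l i ∈ l := by
  simp [pvG, List.getD, List.getElem?_eq_getElem h]

theorem pv_mset_set {l : List Int} {i : Nat} (h : i < l.length) (x : Int) :
    ((l.set i x : List Int) : Multiset Int) = x ::ₘ ((l : Multiset Int).erase (pvG l i)) := by
  show _ = x ::ₘ ((l : Multiset Int).erase (l.getD i 0))
  induction l generalizing i with
  | nil => simp at h
  | cons hd t ih =>
    cases i with
    | zero => simp [List.set]
    | succ i =>
      have hi : i < t.length := by simpa using h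
      have hm : (t.getD i 0) ∈ (t : Multiset Int) := by
        simp only [Multiset.mem_coe]
        simp [List.getD, List.getElem?_eq_getElem hi]
      simp only [List.set, List.getD_cons_succ]
      rw [show ((hd :: t.set i x : List Int) : Multiset Int) = hd ::ₘ (↑(t.set i x) : Multiset Int)
          from (Multiset.cons_coe _ _).symm, ih hi,
        show ((hd :: t : List Int) : Multiset Int) = hd ::ₘ (↑t : Multiset Int)
          from (Multiset.cons_coe _ _).symm]
      by_cases hv : t.getD i 0 = hd
      · rw [hv, Multiset.erase_cons_head, Multiset.cons_swap]
        rw [← hv] at *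
        rw [Multiset.cons_erase hm]
      · rw [Multiset.erase_cons_tail_of_mem hm, Multiset.cons_swap]

theorem sd_length (a : List Int) (s p : Nat) (x : Int) :
    (pvSiftdown a s p x).length = a.length := by
  fun_induction pvSiftdown a s p x <;> simp_all [List.length_set]

theorem sd_mset (a : List Int) (s p : Nat) (x : Int) (hp : p < a.length) :
    ((pvSiftdown a s p x : List Int) : Multiset Int) = ((a.set p x : List Int) : Multiset Int) := by
  fun_induction pvSiftdown a s p x with
  | case1 a p _h pp par hlt ih =>
    have hppp : p ≠ pp := by omega
    have hppl : pp < (a.set p par).length := by simp [List.length_set]; omega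
    rw [ih hppl, pv_mset_set hppl, pvG_set_ne hppp, pv_mset_set hp,
      pv_mset_set (show p < a.length from hp)]
    show x ::ₘ (par ::ₘ (↑a : Multiset Int).erase (pvG a p)).erase par = _
    rw [Multiset.erase_cons_head]
  | case2 => rfl
  | case3 => rfl

theorem pvDescB_le {s p : Nat} (h : pvDescB s p = true) : s ≤ p := by
  rw [pvDescB] at h; by_contra hc; simp [Nat.lt_of_not_le hc] at h

theorem pvDescB_parent {s p : Nat} (h : pvDescB s p = true) (hsp : s < p) :
    pvDescB s ((p - 1) / 2) = true := by
  rw [pvDescB] at h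
  rw [if_neg (by omega), if_neg (by omega)] at h
  exact h

theorem pvDescB_self (s : Nat) : pvDescB s s = true := by
  rw [pvDescB]; simp

theorem pvDescB_zero (p : Nat) : pvDescB 0 p = true := by
  induction p using Nat.strong_induction_on with
  | _ p ih =>
    rw [pvDescB]
    rcases Nat.eq_zero_or_pos p with h | h
    · simp [h]
    · rw [if_neg (by omega), if_neg (by omega)]
      exact ih _ (by omega)

-- bubble-up correctness: from a state that is a heap from s except around the hole p
-- (h1), with the hole's children ≥ x (h2) and the hole's parent ≤ the hole's children (h3),
-- _siftdown restores the heap property from s on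
theorem sd_heap (s : Nat) (x : Int) : ∀ (p : Nat) (a : List Int),
    p < a.length → pvDescB s p = true →
    (∀ u v, s ≤ u → (v = 2 * u + 1 ∨ v = 2 * u + 2) → v < a.length → u ≠ p → v ≠ p →
      pvG a u ≤ pvG a v) →
    (∀ v, (v = 2 * p + 1 ∨ v = 2 * p + 2) → v < a.length → x ≤ pvG a v) →
    (s < p → ∀ v, (v = 2 * p + 1 ∨ v = 2 * p + 2) → v < a.length →
      pvG a ((p - 1) / 2) ≤ pvG a v) →
    pvHeapFrom (pvSiftdown a s p x) s := by
  intro p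
  induction p using Nat.strong_induction_on with
  | _ p ih =>
    intro a hp hd h1 h2 h3
    rw [pvSiftdown]
    by_cases hsp : s < p
    · rw [dif_pos hsp]
      set pp := (p - 1) / 2 with hpp
      set par := pvG a pp with hpar
      have hppltp : pp < p := by omega
      have hppne : pp ≠ p := by omega
      have hd' : pvDescB s pp = true := pvDescB_parent hd hsp
      have hspp : s ≤ pp := pvDescB_le hd'
      by_cases hx : x < par
      · rw [if_pos hx]
        apply ih pp hppltp
        · simpa [List.length_set] using (by omega : pp < a.length)
        · exact hd'
        · -- heap-except-hole is preserved with the new hole pp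
          intro u v hu hedge hv hupp hvpp
          rw [List.length_set] at hv
          by_cases hup : u = p
          · subst hup
            have hvnep : v ≠ u := by omega
            rw [pvG_set_eq hp, pvG_set_ne (Ne.symm hvnep)]
            exact h3 hsp v hedge hv
          · rw [pvG_set_ne (fun h => hup h.symm)]
            by_cases hvp : v = p
            · exfalso; apply hupp; omega
            · rw [pvG_set_ne (fun h => hvp h.symm)]
              exact h1 u v hu hedge hv hup hvp
        · -- x is still below the new hole's children
          intro v hedge hv
          rw [List.length_set] at hv
          by_cases hvp : v = p
          · subst hvp; rw [pvG_set_eq hp]; exact le_of_lt hx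
          · rw [pvG_set_ne (fun h => hvp h.symm)]
            have : pvG a pp ≤ pvG a v := h1 pp v hspp hedge hv hppne hvp
            exact le_of_lt (lt_of_lt_of_le hx this)
        · -- the new hole's parent is below the new hole's children
          intro hsppl v hedge hv
          rw [List.length_set] at hv
          have hppp1 : (pp - 1) / 2 ≠ p := by omega
          have hsppp : s ≤ (pp - 1) / 2 := pvDescB_le (pvDescB_parent hd' hsppl)
          have hedgepp : pp = 2 * ((pp - 1) / 2) + 1 ∨ pp = 2 * ((pp - 1) / 2) + 2 := by omega
          have hstep1 : pvG a ((pp - 1) / 2) ≤ pvG a pp :=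
            h1 _ pp hsppp hedgepp (by omega) hppp1 hppne
          rw [pvG_set_ne (fun h => hppp1 h.symm)]
          by_cases hvp : v = p
          · subst hvp; rw [pvG_set_eq hp]; exact hstep1
          · rw [pvG_set_ne (fun h => hvp h.symm)]
            exact le_trans hstep1 (h1 pp v hspp hedge hv hppne hvp)
      · rw [if_neg hx]
        intro u v hu hedge hv
        rw [List.length_set] at hv
        by_cases hvp : v = p
        · have hu' : u = pp := by omega
          subst hvp hu'
          rw [pvG_set_ne (Ne.symm hppne), pvG_set_eq hp]
          exact le_of_not_gt hx
        · by_cases hup : u = p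
          · subst hup
            rw [pvG_set_eq hp, pvG_set_ne (fun h => hvp h.symm)]
            exact h2 v hedge hv
          · rw [pvG_set_ne (fun h => hup h.symm), pvG_set_ne (fun h => hvp h.symm)]
            exact h1 u v hu hedge hv hup hvp
    · rw [dif_neg hsp]
      intro u v hu hedge hv
      rw [List.length_set] at hv
      by_cases hvp : v = p
      · exfalso
        have := pvDescB_le hd
        omega
      · by_cases hup : u = p
        · subst hup
          rw [pvG_set_eq hp, pvG_set_ne (fun h => hvp h.symm)]
          exact h2 v hedge hv
        · rw [pvG_set_ne (fun h => hup h.symm), pvG_set_ne (fun h => hvp h.symm)]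
          exact h1 u v hu hedge hv hup hvp

theorem su_length (a : List Int) (p : Nat) : (pvSuLoop a p).1.length = a.length := by
  fun_induction pvSuLoop a p <;> simp_all [List.length_set]

theorem su_pos_lt (a : List Int) (p : Nat) (hp : p < a.length) :
    (pvSuLoop a p).2 < a.length := by
  fun_induction pvSuLoop a p with
  | case1 a p h c ih =>
    rw [List.length_set] at ih
    apply ih
    simp only [c]; split <;> omega
  | case2 => simpa

theorem su_leaf (a : List Int) (p : Nat) :
    ¬ (2 * (pvSuLoop a p).2 + 1 < a.length) := by
  fun_induction pvSuLoop a p with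
  | case1 a p h c ih => rw [List.length_set] at ih; exact ih
  | case2 a p h => simpa using h

theorem su_mset (a : List Int) (p : Nat) (hp : p < a.length) (x : Int) :
    (((pvSuLoop a p).1.set (pvSuLoop a p).2 x : List Int) : Multiset Int) =
      ((a.set p x : List Int) : Multiset Int) := by
  fun_induction pvSuLoop a p with
  | case1 a p h c ih =>
    have hc : c < a.length := by simp only [c]; split <;> omega
    have hcp : p ≠ c := by simp only [c]; split <;> omega
    have hl : c < (a.set p (pvG a c)).length := by simpa [List.length_set] using hc
    rw [ih hl, pv_mset_set hl, pvG_set_ne hcp, pv_mset_set hp, pv_mset_set hp]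
    show x ::ₘ (pvG a c ::ₘ ((a : Multiset Int)).erase (pvG a p)).erase (pvG a c) = _
    rw [Multiset.erase_cons_head]
  | case2 => rfl

theorem su_desc (a : List Int) (s p : Nat) (hd : pvDescB s p = true) :
    pvDescB s (pvSuLoop a p).2 = true := by
  fun_induction pvSuLoop a p with
  | case1 a p h c ih =>
    apply ih
    rw [pvDescB]
    have hgt : s < c := by have := pvDescB_le hd; simp only [c]; split <;> omega
    rw [if_neg (by omega), if_neg (by omega)]
    have : (c - 1) / 2 = p := by simp only [c]; split <;> omega
    rw [this]; exact hd
  | case2 _ _ _ => exact hd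

theorem su_inv : ∀ (a : List Int) (p : Nat), ∀ s : Nat,
    p < a.length → pvDescB s p = true →
    (∀ u v, s ≤ u → (v = 2 * u + 1 ∨ v = 2 * u + 2) → v < a.length → u ≠ p → v ≠ p →
      pvG a u ≤ pvG a v) →
    (s < p → ∀ v, (v = 2 * p + 1 ∨ v = 2 * p + 2) → v < a.length →
      pvG a ((p - 1) / 2) ≤ pvG a v) →
    (∀ u v, s ≤ u → (v = 2 * u + 1 ∨ v = 2 * u + 2) → v < a.length →
        u ≠ (pvSuLoop a p).2 → v ≠ (pvSuLoop a p).2 →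
        pvG (pvSuLoop a p).1 u ≤ pvG (pvSuLoop a p).1 v)
    ∧ (s < (pvSuLoop a p).2 →
        ∀ v, (v = 2 * (pvSuLoop a p).2 + 1 ∨ v = 2 * (pvSuLoop a p).2 + 2) → v < a.length →
        pvG (pvSuLoop a p).1 (((pvSuLoop a p).2 - 1) / 2) ≤ pvG (pvSuLoop a p).1 v) := by
  intro a p
  induction a, p using pvSuLoop.induct with
  | case1 a p h c ih =>
    intro s hp hd h1 h3
    have hc : c < a.length := by simp only [c]; split <;> omega
    have hcp : p ≠ c := by simp only [c]; split <;> omega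
    have hedgec : c = 2 * p + 1 ∨ c = 2 * p + 2 := by simp only [c]; split <;> omega
    have hsp : s ≤ p := pvDescB_le hd
    have hsc : s < c := by omega
    have hgcv : ∀ v, (v = 2 * p + 1 ∨ v = 2 * p + 2) → v < a.length → pvG a c ≤ pvG a v := by
      intro v hedge hv
      rcases Nat.lt_or_ge v c with hvc | hvc
      · -- v is the left child, c = 2p+2 chosen: condition held
        have hv1 : v = 2 * p + 1 := by omega
        have hc2 : c = 2 * p + 2 := by omega
        have hcond : 2 * p + 2 < a.length ∧ ¬ pvG a (2 * p + 1) < pvG a (2 * p + 2) := by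
          by_contra hcon
          simp only [c, dif_neg hcon] at hc2
          omega
        rw [hv1, hc2]
        exact le_of_not_gt hcond.2
      · rcases Nat.eq_or_lt_of_le hvc with hvc | hvc
        · rw [← hvc]
        · -- v = 2p+2 > c = 2p+1: condition failed but v in range
          have hv2 : v = 2 * p + 2 := by omega
          have hc1 : c = 2 * p + 1 := by omega
          have hcond : ¬ (2 * p + 2 < a.length ∧ ¬ pvG a (2 * p + 1) < pvG a (2 * p + 2)) := by
            intro hcon
            simp only [c, dif_pos hcon] at hc1
            omega
          rw [hv2, hc1]
          have := not_and.mp hcond (by omega)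
          exact le_of_lt (not_not.mp this)
    have hmain := ih s (by simpa [List.length_set] using hc)
      (by -- descB s c
        rw [pvDescB, if_neg (by omega), if_neg (by omega)]
        have : (c - 1) / 2 = p := by omega
        rw [this]; exact hd)
      (by -- h1'
        intro u v hu hedge hv hunec hvnec
        rw [List.length_set] at hv
        by_cases hup : u = p
        · subst hup
          rw [pvG_set_eq hp, pvG_set_ne (by omega : u ≠ v)]
          exact hgcv v hedge hv
        · rw [pvG_set_ne (fun h' => hup h'.symm)]
          by_cases hvp : v = p
          · rcases Nat.eq_or_lt_of_le hsp with hseq | hslt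
            · exfalso; omega
            · have hu' : u = (p - 1) / 2 := by omega
              rw [hvp, pvG_set_eq hp, hu']
              exact h3 hslt c hedgec hc
          · rw [pvG_set_ne (fun h' => hvp h'.symm)]
            exact h1 u v hu hedge hv hup hvp)
      (by -- h3'
        intro _ v hedge hv
        rw [List.length_set] at hv
        have hc12 : (c - 1) / 2 = p := by omega
        rw [hc12, pvG_set_eq hp, pvG_set_ne (by omega : p ≠ v)]
        exact h1 c v (by omega) hedge hv (fun h' => hcp h'.symm) (by omega))
    rw [pvSuLoop, dif_pos h]
    simp only [List.length_set] at hmain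
    exact hmain
  | case2 a p h =>
    intro s hp hd h1 h3
    rw [pvSuLoop, dif_neg h]
    exact ⟨h1, h3⟩

theorem siftup_heap (a : List Int) (p : Nat) (hp : p < a.length)
    (h : ∀ u v, p + 1 ≤ u → (v = 2 * u + 1 ∨ v = 2 * u + 2) → v < a.length → pvG a u ≤ pvG a v) :
    pvHeapFrom (pvSiftup a p) p := by
  have hinv := su_inv a p p hp (pvDescB_self p)
    (fun u v hu hedge hv hup _ => h u v (by omega) hedge hv)
    (fun hlt => absurd hlt (lt_irrefl p))
  have hq := su_pos_lt a p hp
  have hql := su_length a p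
  have hbl : ((pvSuLoop a p).1.set (pvSuLoop a p).2 (pvG a p)).length = a.length := by
    simp [List.length_set, hql]
  have hd := su_desc a p p (pvDescB_self p)
  have hres := sd_heap p (pvG a p) (pvSuLoop a p).2
    ((pvSuLoop a p).1.set (pvSuLoop a p).2 (pvG a p))
    (by omega) hd
    (by
      intro u v hu hedge hv hu2 hv2
      rw [hbl] at hv
      rw [pvG_set_ne (fun h' => hu2 h'.symm), pvG_set_ne (fun h' => hv2 h'.symm)]
      exact hinv.1 u v hu hedge hv hu2 hv2)
    (by
      intro v hedge hv
      rw [hbl] at hv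
      exfalso; exact su_leaf a p (by omega))
    (by
      intro hlt v hedge hv
      rw [hbl] at hv
      have hne1 : (pvSuLoop a p).2 ≠ ((pvSuLoop a p).2 - 1) / 2 := by omega
      have hne2 : (pvSuLoop a p).2 ≠ v := by omega
      rw [pvG_set_ne hne1, pvG_set_ne hne2]
      exact hinv.2 hlt v hedge hv)
  intro u v hu hedge hv
  rw [pvSiftup] at *
  exact hres u v hu hedge (by rwa [sd_length, hbl] at hv ⊢)

theorem siftup_length (a : List Int) (p : Nat) : (pvSiftup a p).length = a.length := by
  rw [pvSiftup, sd_length, List.length_set, su_length]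

theorem siftup_mset (a : List Int) (p : Nat) (hp : p < a.length) :
    ((pvSiftup a p : List Int) : Multiset Int) = (a : Multiset Int) := by
  have hq := su_pos_lt a p hp
  have hbl : (pvSuLoop a p).2 < ((pvSuLoop a p).1.set (pvSuLoop a p).2 (pvG a p)).length := by
    simp [List.length_set, su_length]; omega
  rw [pvSiftup, sd_mset _ _ _ _ hbl, List.set_set, su_mset a p hp, pv_mset_set hp,
    Multiset.cons_erase (Multiset.mem_coe.mpr (pvG_mem hp))]

theorem hfold : ∀ (k : Nat) (a : List Int), 2 * k ≤ a.length →
    (∀ u v, k ≤ u → (v = 2 * u + 1 ∨ v = 2 * u + 2) → v < a.length → pvG a u ≤ pvG a v) →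
    pvHeapFrom (((List.range k).reverse).foldl (fun h i => pvSiftup h i) a) 0
    ∧ ((((List.range k).reverse).foldl (fun h i => pvSiftup h i) a : List Int) : Multiset Int)
        = (a : Multiset Int)
    ∧ (((List.range k).reverse).foldl (fun h i => pvSiftup h i) a).length = a.length := by
  intro k
  induction k with
  | zero => intro a _ h; exact ⟨h, rfl, rfl⟩
  | succ k ih =>
    intro a hk h
    have hkl : k < a.length := by omega
    rw [show (List.range (k+1)).reverse = k :: (List.range k).reverse by simp [List.range_succ]]
    simp only [List.foldl_cons]
    have h1 : pvHeapFrom (pvSiftup a k) k := siftup_heap a k hkl h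
    have hlen := siftup_length a k
    obtain ⟨r1, r2, r3⟩ := ih (pvSiftup a k) (by omega)
      h1
    exact ⟨r1, r2.trans (siftup_mset a k hkl), r3.trans hlen⟩

theorem heapify_spec (a : List Int) :
    pvHeapFrom (pvHeapify a) 0 ∧ ((pvHeapify a : List Int) : Multiset Int) = (a : Multiset Int)
    ∧ (pvHeapify a).length = a.length := by
  exact hfold (a.length / 2) a (by omega)
    (fun u v hu hedge hv => by exfalso; omega)

theorem root_min (a : List Int) (h : pvHeapFrom a 0) :
    ∀ i, i < a.length → pvG a 0 ≤ pvG a i := by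
  intro i
  induction i using Nat.strong_induction_on with
  | _ i ih =>
    intro hi
    rcases Nat.eq_zero_or_pos i with h0 | h0
    · subst h0; exact le_refl _
    · have hpar : i = 2 * ((i - 1) / 2) + 1 ∨ i = 2 * ((i - 1) / 2) + 2 := by omega
      exact le_trans (ih _ (by omega) (by omega)) (h _ i (Nat.zero_le _) hpar hi)

theorem pvG_dropLast {l : List Int} {i : Nat} (h : i + 1 < l.length) :
    pvG l.dropLast i = pvG l i := by
  simp [pvG, List.getD, List.getElem?_dropLast]
  rw [if_pos (by omega)]

theorem pvG_append_left {l t : List Int} {i : Nat} (h : i < l.length) :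
    pvG (l ++ t) i = pvG l i := by
  simp [pvG, List.getD, List.getElem?_append_left h]

theorem pop_spec (a : List Int) (h : pvHeapFrom a 0) (hne : a ≠ []) :
    (a : Multiset Int) = (pvHeappop a).1 ::ₘ ((pvHeappop a).2 : Multiset Int)
    ∧ pvHeapFrom (pvHeappop a).2 0
    ∧ (∀ y ∈ a, (pvHeappop a).1 ≤ y)
    ∧ (pvHeappop a).2.length + 1 = a.length := by
  have hn : 0 < a.length := List.length_pos_iff.mpr hne
  rcases Nat.lt_or_ge a.length 2 with h2 | h2
  · -- singleton
    have h1 : a.length = 1 := by omega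
    obtain ⟨y, rfl⟩ := List.length_eq_one_iff.mp h1
    refine ⟨by simp [pvHeappop, pvG], ?_, by simp [pvHeappop, pvG], by simp [pvHeappop]⟩
    intro u v _ hedge hv
    simp [pvHeappop] at hv
  · -- length ≥ 2
    have hrl : a.dropLast.length = a.length - 1 := List.length_dropLast
    have hrne : ¬ a.dropLast.isEmpty := by
      simp [List.isEmpty_iff, ← List.length_pos_iff]; omega
    have hpop : pvHeappop a =
        (pvG a.dropLast 0, pvSiftup (a.dropLast.set 0 (pvG a (a.length - 1))) 0) := by
      rw [pvHeappop]; simp [hrne]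
    set lastelt := pvG a (a.length - 1) with hle
    set b : List Int := a.dropLast.set 0 lastelt with hb
    have hbl : b.length = a.length - 1 := by simp [hb, List.length_set, hrl]
    have hb0 : 0 < b.length := by omega
    have hheapb : ∀ u v, 1 ≤ u → (v = 2 * u + 1 ∨ v = 2 * u + 2) → v < b.length →
        pvG b u ≤ pvG b v := by
      intro u v hu hedge hv
      rw [hbl] at hv
      rw [hb, pvG_set_ne (by omega : (0:Nat) ≠ u), pvG_set_ne (by omega : (0:Nat) ≠ v),
        pvG_dropLast (by omega), pvG_dropLast (by omega)]
      exact h u v (Nat.zero_le _) hedge (by omega)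
    have hheap : pvHeapFrom (pvSiftup b 0) 0 :=
      siftup_heap b 0 hb0 (fun u v hu hedge hv => hheapb u v hu hedge hv)
    have hglast : lastelt = a.getLast hne := by
      have h1 : a.length - 1 < a.length := by omega
      simp [hle, pvG, List.getD, List.getElem?_eq_getElem h1, List.getLast_eq_getElem]
    have hg0 : pvG a.dropLast 0 = pvG a 0 := pvG_dropLast (by omega)
    have hmema : pvG a.dropLast 0 ∈ (a.dropLast : Multiset Int) := by
      exact Multiset.mem_coe.mpr (pvG_mem (by omega))
    have hmset : (a : Multiset Int) = pvG a.dropLast 0 ::ₘ ((pvSiftup b 0 : List Int) : Multiset Int) := by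
      rw [siftup_mset b 0 hb0, hb, pv_mset_set (by omega)]
      have hsplit : (a : Multiset Int) = lastelt ::ₘ (a.dropLast : Multiset Int) := by
        conv_lhs => rw [← List.dropLast_concat_getLast hne]
        rw [← hglast]
        simp
      rw [hsplit, Multiset.cons_swap, Multiset.cons_erase hmema]
    rw [hpop]
    refine ⟨hmset, hheap, ?_, ?_⟩
    · intro y hy
      obtain ⟨i, hi, rfl⟩ := List.mem_iff_getElem.mp hy
      have : pvG a i = a[i] := by simp [pvG, List.getD, List.getElem?_eq_getElem hi]
      rw [hg0, ← this]
      exact root_min a h i hi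
    · rw [siftup_length, hbl]; omega

theorem push_spec (a : List Int) (x : Int) (h : pvHeapFrom a 0) :
    ((pvHeappush a x : List Int) : Multiset Int) = x ::ₘ (a : Multiset Int)
    ∧ pvHeapFrom (pvHeappush a x) 0 := by
  have hlb : (a ++ [x]).length = a.length + 1 := by simp
  have hp : a.length < (a ++ [x]).length := by omega
  constructor
  · rw [pvHeappush, sd_mset _ _ _ _ hp, pv_mset_set hp]
    have hgx : pvG (a ++ [x]) a.length = x := by simp [pvG, List.getD]
    rw [hgx]
    have : ((a ++ [x] : List Int) : Multiset Int) = x ::ₘ (a : Multiset Int) := by simp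
    rw [this, Multiset.erase_cons_head]
  · exact sd_heap 0 x a.length (a ++ [x]) hp (pvDescB_zero _)
      (by
        intro u v hu hedge hv hup hvp
        rw [hlb] at hv
        have hul : u < a.length := by omega
        have hvl : v < a.length := by omega
        rw [pvG_append_left hul, pvG_append_left hvl]
        exact h u v hu hedge hvl)
      (by intro v hedge hv; rw [hlb] at hv; omega)
      (by intro _ v hedge hv; rw [hlb] at hv; omega)

-- one pop of a heap mirroring one max+remove of the value list
theorem pop_step (m vals : List Int) (hheap : pvHeapFrom m 0)
    (hM : (m : Multiset Int) = Multiset.map (fun v => -v) (vals : Multiset Int))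
    (hvne : vals ≠ []) (A : Int) (hA : PySem.List.max? vals (fun y => y) = some A) :
    (pvHeappop m).1 = -A
    ∧ ((pvHeappop m).2 : Multiset Int)
        = Multiset.map (fun v => -v) ((vals.erase A : List Int) : Multiset Int)
    ∧ pvHeapFrom (pvHeappop m).2 0
    ∧ (pvHeappop m).2.length + 1 = vals.length := by
  have hmlen : m.length = vals.length := by
    have := congrArg Multiset.card hM
    simpa using this
  have hmne : m ≠ [] := by
    intro hc; rw [hc] at hmlen
    exact hvne (List.eq_nil_of_length_eq_zero hmlen.symm)
  obtain ⟨hpm, hph, hpmin, hpl⟩ := pop_spec m hheap hmne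
  have hAmem : A ∈ vals := PySem.List.max?_mem hA
  have hAmax : ∀ y ∈ vals, y ≤ A := by
    intro y hy; exact PySem.List.max?_isMax hA y hy
  have hv1 : (pvHeappop m).1 = -A := by
    have hmem1 : (pvHeappop m).1 ∈ (m : Multiset Int) := by
      rw [hpm]; exact Multiset.mem_cons_self _ _
    rw [hM] at hmem1
    obtain ⟨w, hw, hweq⟩ := Multiset.mem_map.mp hmem1
    have hup : (pvHeappop m).1 ≥ -A := by
      rw [← hweq]; exact neg_le_neg (hAmax w (Multiset.mem_coe.mp hw))
    have hdown : (pvHeappop m).1 ≤ -A := by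
      apply hpmin
      have : (-A) ∈ (m : Multiset Int) := by
        rw [hM]
        exact Multiset.mem_map.mpr ⟨A, Multiset.mem_coe.mpr hAmem, rfl⟩
      exact Multiset.mem_coe.mp this
    omega
  refine ⟨hv1, ?_, hph, ?_⟩
  · have hsplit : (vals : Multiset Int) = A ::ₘ ((vals.erase A : List Int) : Multiset Int) := by
      have : ((vals.erase A : List Int) : Multiset Int) = (vals : Multiset Int).erase A := by
        exact_mod_cast rfl
      rw [this, Multiset.cons_erase (Multiset.mem_coe.mpr hAmem)]
    have : (pvHeappop m).1 ::ₘ ((pvHeappop m).2 : Multiset Int)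
        = (pvHeappop m).1 ::ₘ Multiset.map (fun v => -v) ((vals.erase A : List Int) : Multiset Int) := by
      rw [← hpm, hM, hsplit, Multiset.map_cons, hv1]
    exact (Multiset.cons_inj_right _).mp this
  · omega

theorem loop_sim : ∀ (k : Nat) (m vals : List Int), pvHeapFrom m 0 →
    (m : Multiset Int) = Multiset.map (fun v => -v) (vals : Multiset Int) →
    k + 1 ≤ vals.length →
    ((pvALoop k m : List Int) : Multiset Int)
        = Multiset.map (fun v => -v) ((pvBLoop k vals : List Int) : Multiset Int)
    ∧ (pvBLoop k vals).length + k = vals.length := by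
  intro k
  induction k with
  | zero => intro m vals _ hM _; exact ⟨hM, by simp [pvBLoop]⟩
  | succ k ih =>
    intro m vals hheap hM hk
    have hvne : vals ≠ [] := by
      intro hc; rw [hc] at hk; simp at hk
    obtain ⟨A, hA⟩ : ∃ A, PySem.List.max? vals (fun y => y) = some A := by
      cases h : PySem.List.max? vals (fun y => y) with
      | none => exact absurd ((PySem.List.max?_eq_none_iff vals _).mp h) hvne
      | some A => exact ⟨A, rfl⟩
    obtain ⟨hv1, hm1, hh1, hl1⟩ := pop_step m vals hheap hM hvne A hA
    have hAmem : A ∈ vals := PySem.List.max?_mem hA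
    have hvals1len : (vals.erase A).length + 1 = vals.length := by
      rw [List.length_erase_of_mem hAmem]; omega
    have hv1ne : vals.erase A ≠ [] := by
      intro hc; rw [hc] at hvals1len; simp at hvals1len; omega
    obtain ⟨B, hB⟩ : ∃ B, PySem.List.max? (vals.erase A) (fun y => y) = some B := by
      cases h : PySem.List.max? (vals.erase A) (fun y => y) with
      | none => exact absurd ((PySem.List.max?_eq_none_iff (vals.erase A) _).mp h) hv1ne
      | some B => exact ⟨B, rfl⟩
    obtain ⟨hv2, hm2, hh2, hl2⟩ := pop_step (pvHeappop m).2 (vals.erase A) hh1 hm1 hv1ne B hB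
    have hBmem : B ∈ vals.erase A := PySem.List.max?_mem hB
    -- the pushed value is -(A - B)
    have hpushv : -1 * (-(pvHeappop m).1 - -(pvHeappop (pvHeappop m).2).1) = -(A - B) := by
      rw [hv1, hv2]; ring
    have hm3 := push_spec (pvHeappop (pvHeappop m).2).2
      (-1 * (-(pvHeappop m).1 - -(pvHeappop (pvHeappop m).2).1)) hh2
    have hM3 : ((pvHeappush (pvHeappop (pvHeappop m).2).2
          (-1 * (-(pvHeappop m).1 - -(pvHeappop (pvHeappop m).2).1)) : List Int) : Multiset Int)
        = Multiset.map (fun v => -v)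
          (((vals.erase A).erase B ++ [A - B] : List Int) : Multiset Int) := by
      rw [hm3.1, hm2, hpushv]
      have : (((vals.erase A).erase B ++ [A - B] : List Int) : Multiset Int)
          = (A - B) ::ₘ (((vals.erase A).erase B : List Int) : Multiset Int) := by simp
      rw [this, Multiset.map_cons]
    have hlen3 : ((vals.erase A).erase B ++ [A - B]).length = vals.length - 1 := by
      rw [List.length_append, List.length_erase_of_mem hBmem, List.length_erase_of_mem hAmem]
      simp; omega
    obtain ⟨r1, r2⟩ := ih _ _ hm3.2 hM3 (by omega)
    constructor
    · show ((pvALoop k _ : List Int) : Multiset Int) = _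
      rw [show pvBLoop (k+1) vals = pvBLoop k ((vals.erase A).erase B ++ [A - B]) by
          simp only [pvBLoop, hA, PySem.List.remove?_eq_some_erase vals A hAmem, Option.getD_some,
            hB, PySem.List.remove?_eq_some_erase (vals.erase A) B hBmem]]
      exact r1
    · rw [show pvBLoop (k+1) vals = pvBLoop k ((vals.erase A).erase B ++ [A - B]) by
          simp only [pvBLoop, hA, PySem.List.remove?_eq_some_erase vals A hAmem, Option.getD_some,
            hB, PySem.List.remove?_eq_some_erase (vals.erase A) B hBmem]]
      omega

theorem numberOfWeeks_ok (milestones : List Int) (hpre : milestones ≠ []) :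
    numberOfWeeks milestones = numberOfWeeks_alt milestones := by
  have hn : 0 < milestones.length := List.length_pos_iff.mpr hpre
  obtain ⟨hh, hm, hl⟩ := heapify_spec (milestones.map (fun x => -x))
  have hM0 : ((pvHeapify (milestones.map (fun x => -x)) : List Int) : Multiset Int)
      = Multiset.map (fun v => -v) (milestones : Multiset Int) := by
    rw [hm, ← Multiset.map_coe]
  obtain ⟨hM, hlen⟩ := loop_sim (milestones.length - 1) _ milestones hh hM0 (by omega)
  have hblen : (pvBLoop (milestones.length - 1) milestones).length = 1 := by omega
  obtain ⟨y, hy⟩ := List.length_eq_one_iff.mp hblen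
  rw [hy] at hM
  have hMy : ((pvALoop (milestones.length - 1)
      (pvHeapify (milestones.map (fun x => -x))) : List Int) : Multiset Int) = ↑[-y] := by
    rw [hM]; simp
  have ha : pvALoop (milestones.length - 1) (pvHeapify (milestones.map (fun x => -x))) = [-y] :=
    List.perm_singleton.mp (Multiset.coe_eq_coe.mp hMy)
  rw [numberOfWeeks, numberOfWeeks_alt]
  simp only [ha, hy]
  have hg : pvG [-y] 0 = -y := rfl
  rw [hg]
  have hgd : ([y] : List Int).getD 0 0 = y := rfl
  rw [hgd]
  by_cases hcase : y = 0 ∨ y = 1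
  · rw [if_pos (by omega), if_pos hcase]
  · rw [if_neg (by omega), if_neg hcase]
    omega

-- ===== VERDICT (by name: the statement is the Claim_ definition above) =====
theorem numberOfWeeks_spec : Claim_equal_numberOfWeeks := by
  intro milestones _hdom hpre
  unfold Spec_numberOfWeeks
  exact numberOfWeeks_ok milestones hpre
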